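-- pv_equiv track=rewrite | github.com/probapraise/project-i3 | l7_scene_prompt_map_runner.py | _normalize_scene_filter
-- ===== SOURCE A (Python) =====
-- class ContractError(Exception):
--     """Raised when input contract preconditions are violated."""
--
-- def _normalize_scene_filter(scene_ids: list[str]) -> list[str]:
--     out: list[str] = []
--     seen: set[str] = set()
--     for raw in scene_ids:
--         scene_id = str(raw).strip()
--         if not scene_id:
--             raise ContractError("--scene-id must be a non-empty string")
--         if scene_id in seen:
--             continue
--         seen.add(scene_id)
--         out.append(scene_id)
--     return out
-- ===== SOURCE B (Python) =====
-- class ContractError(Exception):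
--     """Raised when input contract preconditions are violated."""
--
-- def _normalize_scene_filter(scene_ids: list[str]) -> list[str]:
--     cleaned = [str(r).strip() for r in scene_ids]
--     if "" in cleaned:
--         raise ContractError("--scene-id must be a non-empty string")
--     # build the result back-to-front: each element is put in front and every
--     # duplicate of it is purged from the partial result, so first occurrences
--     # survive in order -- no seen-set is maintained
--     out: list[str] = []
--     for s in reversed(cleaned):
--         out = [s] + [x for x in out if x != s]
--     return out
-- ===== Notes on version B (the rewrite author's own statement) =====
-- stated objective: alternative
-- what changed: Replaces the forward loop with a seen-set by a back-to-front fold that prepends each element and purges its duplicates from the partial result, so first occurrences survive without any auxiliary set.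
import Mathlib
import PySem

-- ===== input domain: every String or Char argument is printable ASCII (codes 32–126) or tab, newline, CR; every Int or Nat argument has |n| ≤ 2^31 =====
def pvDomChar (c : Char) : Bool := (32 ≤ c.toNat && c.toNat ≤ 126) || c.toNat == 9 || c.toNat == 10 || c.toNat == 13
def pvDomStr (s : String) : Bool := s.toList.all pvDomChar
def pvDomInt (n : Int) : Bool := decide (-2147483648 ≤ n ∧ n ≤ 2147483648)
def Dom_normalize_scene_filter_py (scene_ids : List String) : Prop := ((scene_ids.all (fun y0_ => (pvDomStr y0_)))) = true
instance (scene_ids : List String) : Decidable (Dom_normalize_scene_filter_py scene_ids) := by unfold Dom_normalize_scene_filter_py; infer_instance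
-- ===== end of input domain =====

-- B replaces A's forward seen-set loop by a back-to-front fold that prepends each
-- element and purges its duplicates from the partial result; objective: alternative.

-- ===== PORT A =====
-- A's single loop: strip, raise on empty (outside Pre_; the port stops and returns `out` there), skip if seen, else record.
def normalizeSceneFilterGoA : List String → List String → PySem.Set String → List String
  | [], out, _ => out
  | raw :: rest, out, seen =>
    let sceneId := PySem.Str.strip raw
    if sceneId == "" then out  -- 'raise ContractError' in Python: excluded by Pre_
    else if PySem.Set.contains seen sceneId then normalizeSceneFilterGoA rest out seen
    else normalizeSceneFilterGoA rest (out ++ [sceneId]) (PySem.Set.add seen sceneId)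

def normalize_scene_filter_py (scene_ids : List String) : List String :=
  normalizeSceneFilterGoA scene_ids [] PySem.Set.empty

-- ===== PORT B =====
def normalize_scene_filter_py_alt (scene_ids : List String) : List String :=
  let cleaned := scene_ids.map PySem.Str.strip
  if cleaned.contains "" then []  -- 'raise ContractError' in Python: excluded by Pre_
  -- 'for s in reversed(cleaned): out = [s] + [x for x in out if x != s]' is a right fold
  else cleaned.foldr (fun s out => s :: out.filter (fun x => !(x == s))) []

-- ===== PRECONDITION & SPEC =====
-- Pre_ excludes exactly the inputs where A raises ContractError: some element strips to the empty string.
def Pre_normalize_scene_filter_py (scene_ids : List String) : Prop :=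
  (scene_ids.all (fun s => !(PySem.Str.strip s == ""))) = true
instance (scene_ids : List String) : Decidable (Pre_normalize_scene_filter_py scene_ids) := by
  unfold Pre_normalize_scene_filter_py; infer_instance

def pvWitness_normalize_scene_filter_py : List String := [" a ", "b", "a", "b"]

def Spec_normalize_scene_filter_py (scene_ids : List String) (out : List String) : Prop := out = normalize_scene_filter_py_alt scene_ids
instance (scene_ids : List String) (out : List String) : Decidable (Spec_normalize_scene_filter_py scene_ids out) := by unfold Spec_normalize_scene_filter_py; infer_instance

-- ===== CLAIM (what is proved, stated in full; the proofs are below) =====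
def Claim_equal_normalize_scene_filter_py : Prop := ∀ (scene_ids : List String), Dom_normalize_scene_filter_py scene_ids → Pre_normalize_scene_filter_py scene_ids → Spec_normalize_scene_filter_py scene_ids (normalize_scene_filter_py scene_ids)

-- ===== LEMMAS AND PROOFS =====

-- A's loop, started with out = seen, extends `seen` exactly like set.update over the stripped list.
theorem normalizeSceneFilterGoA_eq_update (xs : List String) (seen : PySem.Set String)
    (h : ∀ x ∈ xs, (PySem.Str.strip x == "") = false) :
    normalizeSceneFilterGoA xs seen seen = PySem.Set.update seen (xs.map PySem.Str.strip) := by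
  induction xs generalizing seen with
  | nil => simp [normalizeSceneFilterGoA, PySem.Set.update]
  | cons raw rest ih =>
    have hraw := h raw (by simp)
    have hrest : ∀ x ∈ rest, (PySem.Str.strip x == "") = false := fun x hx => h x (by simp [hx])
    simp only [normalizeSceneFilterGoA, hraw, if_false, Bool.false_eq_true]
    by_cases hc : PySem.Set.contains seen (PySem.Str.strip raw)
    · have hm : PySem.Str.strip raw ∈ seen := by simpa [PySem.Set.contains] using hc
      have hadd : PySem.Set.add seen (PySem.Str.strip raw) = seen := by
        simp [PySem.Set.add, PySem.Set.contains, hm]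
      rw [if_pos hc, ih seen hrest]
      simp [PySem.Set.update, List.map_cons, List.foldl_cons, hadd]
    · have hm : PySem.Str.strip raw ∉ seen := by simpa [PySem.Set.contains] using hc
      have hadd : PySem.Set.add seen (PySem.Str.strip raw) = seen ++ [PySem.Str.strip raw] := by
        simp [PySem.Set.add, PySem.Set.contains, hm]
      rw [if_neg hc, ← hadd, ih _ hrest]
      simp [PySem.Set.update]

-- B's back-to-front purge fold computes set-of-list (first occurrences in order).
theorem foldr_purge_eq_ofList (l : List String) :
    l.foldr (fun s out => s :: out.filter (fun x => !(x == s))) [] = PySem.Set.ofList l := by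
  induction l with
  | nil => simp [PySem.Set.ofList]
  | cons a t ih =>
    have hcons : PySem.Set.ofList (a :: t)
        = [a] ++ (PySem.Set.ofList t).filter (fun y => !(PySem.Set.contains [a] y)) := by
      have : PySem.Set.ofList (a :: t) = PySem.Set.update (PySem.Set.add PySem.Set.empty a) t := by
        simp [PySem.Set.ofList, PySem.Set.update]
      rw [this]
      have hadd : PySem.Set.add PySem.Set.empty a = [a] := by
        simp [PySem.Set.add, PySem.Set.empty, PySem.Set.contains]
      rw [hadd, PySem.Set.update_eq_append_filter]
    rw [List.foldr_cons, ih, hcons]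
    simp only [List.singleton_append, List.cons.injEq, true_and]
    apply List.filter_congr
    intro x _
    have hb : PySem.Set.contains [a] x = (x == a) := by
      rw [Bool.eq_iff_iff, PySem.Set.contains_iff]
      simp
    rw [hb]

theorem normalize_scene_filter_py_spec : Claim_equal_normalize_scene_filter_py := by
  intro scene_ids _ hpre
  unfold Spec_normalize_scene_filter_py normalize_scene_filter_py normalize_scene_filter_py_alt
  have h : ∀ x ∈ scene_ids, (PySem.Str.strip x == "") = false := by
    intro x hx
    simpa using List.all_eq_true.mp hpre x hx
  have hmem : ((scene_ids.map PySem.Str.strip).contains "") = false := by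
    simp only [List.contains_eq_any_beq, List.any_map, List.any_eq_false, Function.comp]
    intro x hx
    simpa [BEq.comm] using h x hx
  have hgo := normalizeSceneFilterGoA_eq_update scene_ids PySem.Set.empty h
  simp only [PySem.Set.empty] at hgo ⊢
  rw [hgo]
  simp only [PySem.Set.update_nil_left]
  simp only [foldr_purge_eq_ofList, hmem, Bool.false_eq_true, if_false]
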